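-- pv_equiv track=rewrite | github.com/windikite/TuplesAssignment | librarySystemEnhancement.py | lookupBook
-- ===== SOURCE A (Python) =====
-- library = [("1984", "George Orwell"), ("Brave New World", "Aldous Huxley")]
--
-- def lookupBook(title, author):
--     titles = []
--     authors = []
--     for book in library:
--         titles.append(book[0])
--         authors.append(book[1])
--     found_Title = True if title in titles else False
--     index = titles.index(title) if found_Title == True else -1
--     # This allows for duplicate titles and duplicate authors, but not duplicate titles *with* duplicate authors
--     found_Author = index if authors[index] == author else -1
--     return found_Author
-- ===== SOURCE B (Python) =====
-- library = [("1984", "George Orwell"), ("Brave New World", "Aldous Huxley")]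
--
-- def lookupBook(title, author):
--     for i, (t, a) in enumerate(library):
--         if t == title:
--             return i if a == author else -1
--     return -1
-- ===== Notes on version B (the rewrite author's own statement) =====
-- stated objective: simpler
-- what changed: Replaces the three-pass scheme (build two parallel lists, membership test, .index scan, indexed author check) with one enumerate loop over the library that returns at the first title match, gating on the author.
import Mathlib
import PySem

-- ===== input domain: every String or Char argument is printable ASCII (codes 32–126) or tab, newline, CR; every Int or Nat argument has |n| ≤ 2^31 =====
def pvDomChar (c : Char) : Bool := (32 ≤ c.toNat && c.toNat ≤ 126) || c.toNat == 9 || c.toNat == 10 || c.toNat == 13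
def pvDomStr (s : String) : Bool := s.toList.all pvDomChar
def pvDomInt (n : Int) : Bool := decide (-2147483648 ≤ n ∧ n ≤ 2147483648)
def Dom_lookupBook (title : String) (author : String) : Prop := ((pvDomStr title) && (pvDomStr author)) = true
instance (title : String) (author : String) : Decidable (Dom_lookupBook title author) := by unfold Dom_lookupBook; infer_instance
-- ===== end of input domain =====

-- B is one enumerate loop with an early return instead of A's parallel lists + membership test + .index scan; same values everywhere.

-- ===== PORT A =====
def libraryConst : List (String × String) :=
  [("1984", "George Orwell"), ("Brave New World", "Aldous Huxley")]

def lookupBook (title : String) (author : String) : Int :=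
  let titles := libraryConst.foldl (fun acc b => acc ++ [b.1]) []
  let authors := libraryConst.foldl (fun acc b => acc ++ [b.2]) []
  let found_Title : Bool := if titles.contains title then true else false
  let index : Int := if found_Title = true then
      (((PySem.List.index? titles title).getD 0 : Nat) : Int) else -1
  -- authors[index]: index ∈ {-1, 0, 1} and authors has length 2, so the access never raises;
  -- pyGet? is exact here (negative index reads from the end, as Python does).
  let found_Author : Int := if PySem.List.pyGet? authors index = some author then index else -1
  found_Author

-- ===== PORT B =====
def lookupBookAltGo (title author : String) (i : Int) : List (String × String) → Int
  | [] => -1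
  | (t, a) :: rest =>
      if t = title then (if a = author then i else -1)
      else lookupBookAltGo title author (i + 1) rest

def lookupBook_alt (title : String) (author : String) : Int :=
  lookupBookAltGo title author 0 libraryConst

-- ===== PRECONDITION & SPEC =====
def Spec_lookupBook (title : String) (author : String) (out : Int) : Prop := out = lookupBook_alt title author
instance (title : String) (author : String) (out : Int) : Decidable (Spec_lookupBook title author out) := by unfold Spec_lookupBook; infer_instance

-- ===== CLAIM (what is proved, stated in full; the proofs are below) =====
def Claim_equal_lookupBook : Prop := ∀ (title : String) (author : String), Dom_lookupBook title author → Spec_lookupBook title author (lookupBook title author)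

-- ===== LEMMAS AND PROOFS =====

-- ===== VERDICT (by name: the statement is the Claim_ definition above) =====
theorem lookupBook_spec : Claim_equal_lookupBook := by
  intro title author _
  unfold Spec_lookupBook lookupBook lookupBook_alt libraryConst
  by_cases h1 : title = "1984"
  · subst h1
    by_cases h2 : author = "George Orwell" <;>
      simp [h2, lookupBookAltGo, PySem.List.index?, PySem.List.pyGet?, PySem.List.pyIdx?, List.idxOf?, List.findIdx?, List.findIdx?.go]
  · by_cases h2 : title = "Brave New World"
    · subst h2
      by_cases h3 : author = "Aldous Huxley" <;>
        simp [h1, h3, lookupBookAltGo, PySem.List.index?, PySem.List.pyGet?, PySem.List.pyIdx?, List.idxOf?, List.findIdx?, List.findIdx?.go, Ne.symm]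
    · simp [h1, h2, lookupBookAltGo, PySem.List.pyGet?, PySem.List.pyIdx?, Ne.symm]
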